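-- pv_equiv track=rewrite | github.com/XIlilalala/gel_labeler | gel_labeler.py | generate_sample_names
-- ===== SOURCE A (Python) =====
-- def generate_sample_names(first_name, total_rows):
--     """生成样品名称"""
--     # 提取基础名称和起始数字
--     base_name = ''.join(filter(str.isalpha, first_name))
--     start_num = int(''.join(filter(str.isdigit, first_name)))
--
--     all_names = []
--     for row in range(total_rows):
--         row_names = []
--         for col in range(17):  # 17个电泳孔
--             if col == 8:  # 第9个位置
--                 row_names.append('M')
--             else:
--                 # 计算当前位置的编号
--                 current_num = start_num + col + (row * 16)  # 16是除去M后每行的数量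
--                 if col > 8:  # 如果在M之后，需要减1以保持连续性
--                     current_num -= 1
--                 row_names.append(f"{base_name}{current_num}")
--         all_names.append(row_names)
--     return all_names
-- ===== SOURCE B (Python) =====
-- def generate_sample_names(first_name, total_rows):
--     """生成样品名称"""
--     base = ''.join(c for c in first_name if c.isalpha())
--     start = int(''.join(c for c in first_name if c.isdigit()))
--     # one flat run of 16*total_rows consecutive names, then chunk into rows with 'M' at index 8
--     flat = [f"{base}{start + i}" for i in range(16 * total_rows)]
--     return [flat[16 * r : 16 * r + 8] + ['M'] + flat[16 * r + 8 : 16 * r + 16]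
--             for r in range(total_rows)]
-- ===== Notes on version B (the rewrite author's own statement) =====
-- stated objective: simpler
-- what changed: B builds the flat run of 16*total_rows consecutive names in one comprehension and chunks it into rows with 'M' inserted at index 8, replacing A's nested per-cell loop with the offset-and-correction formula.
import Mathlib
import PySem

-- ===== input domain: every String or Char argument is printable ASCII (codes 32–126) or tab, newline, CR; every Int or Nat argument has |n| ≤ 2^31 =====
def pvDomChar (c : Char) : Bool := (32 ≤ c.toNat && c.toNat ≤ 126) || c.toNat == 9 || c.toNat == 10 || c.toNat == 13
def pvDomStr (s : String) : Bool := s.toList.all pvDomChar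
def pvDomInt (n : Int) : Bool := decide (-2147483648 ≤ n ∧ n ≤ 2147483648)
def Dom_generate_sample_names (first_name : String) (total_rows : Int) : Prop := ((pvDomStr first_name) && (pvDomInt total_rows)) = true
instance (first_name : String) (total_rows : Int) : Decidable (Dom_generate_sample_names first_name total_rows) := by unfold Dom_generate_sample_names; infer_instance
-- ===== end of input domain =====

-- B builds the flat run of 16*total_rows consecutive names once and chunks it into rows with 'M'
-- inserted at index 8, instead of A's per-cell offset-and-correction formula (objective: simpler).

-- ===== PORT A =====
def generate_sample_names (first_name : String) (total_rows : Int) : List (List String) :=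
  let base_name := first_name.toList.filter PySem.Chars.isalpha
  match PySem.Int.ofChars? (first_name.toList.filter PySem.Chars.isdigit) with
  | none => []   -- Python raises ValueError here; excluded by Pre_
  | some start_num =>
    (PySem.List.pyRange 0 total_rows 1).foldl (fun all_names row =>
      all_names ++
        [(PySem.List.pyRange 0 17 1).foldl (fun row_names col =>
          row_names ++
            [if col == 8 then "M"
             else
               let current_num := start_num + col + row * 16
               let current_num := if col > 8 then current_num - 1 else current_num
               String.ofList (base_name ++ PySem.Int.toChars current_num)]) []]) []

-- ===== PORT B =====
def generate_sample_names_alt (first_name : String) (total_rows : Int) : List (List String) :=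
  let base := first_name.toList.filter PySem.Chars.isalpha
  match PySem.Int.ofChars? (first_name.toList.filter PySem.Chars.isdigit) with
  | none => []   -- Python raises ValueError here; excluded by Pre_
  | some start =>
    let flat := (PySem.List.pyRange 0 (16 * total_rows) 1).map
      (fun i => String.ofList (base ++ PySem.Int.toChars (start + i)))
    (PySem.List.pyRange 0 total_rows 1).map (fun r =>
      PySem.List.slice flat (some (16 * r)) (some (16 * r + 8)) ++ ["M"] ++
      PySem.List.slice flat (some (16 * r + 8)) (some (16 * r + 16)))

-- ===== PRECONDITION & SPEC =====
-- Pre_ excludes exactly the inputs where first_name contains no digit character: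
-- there int('') raises ValueError in A (and in B).
def Pre_generate_sample_names (first_name : String) (total_rows : Int) : Prop :=
  first_name.toList.filter PySem.Chars.isdigit ≠ []
instance (first_name : String) (total_rows : Int) : Decidable (Pre_generate_sample_names first_name total_rows) := by unfold Pre_generate_sample_names; infer_instance

def pvWitness_generate_sample_names : String × Int := ("abc12", 2)

def Spec_generate_sample_names (first_name : String) (total_rows : Int) (out : List (List String)) : Prop := out = generate_sample_names_alt first_name total_rows
instance (first_name : String) (total_rows : Int) (out : List (List String)) : Decidable (Spec_generate_sample_names first_name total_rows out) := by unfold Spec_generate_sample_names; infer_instance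

-- ===== CLAIM (what is proved, stated in full; the proofs are below) =====
def Claim_equal_generate_sample_names : Prop := ∀ (first_name : String) (total_rows : Int), Dom_generate_sample_names first_name total_rows → Pre_generate_sample_names first_name total_rows → Spec_generate_sample_names first_name total_rows (generate_sample_names first_name total_rows)

-- ===== LEMMAS AND PROOFS =====

-- a slice of a mapped range is the mapped sub-range
theorem slice_map_pyRange {α : Type} (f : Int → α) (N a b : Int)
    (h0 : 0 ≤ a) (hab : a ≤ b) (hbN : b ≤ N) :
    PySem.List.slice ((PySem.List.pyRange 0 N 1).map f) (some a) (some b)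
      = (PySem.List.pyRange a b 1).map f := by
  rw [PySem.List.slice_toNat _ h0 (h0.trans hab), PySem.List.pyRange_one, PySem.List.pyRange_one]
  apply List.ext_getElem
  · simp
    omega
  · intro i h1 h2
    simp only [List.getElem_take, List.getElem_drop, List.getElem_map, List.getElem_range]
    congr 1
    simp at h1
    omega

-- the two row builders agree for every row index inside the grid
theorem row_eq (base : List Char) (start total r : Int) (h0 : 0 ≤ r) (hr : r < total) :
    List.map (fun x =>
        if (x == 8) = true then "M"
        else String.ofList (base ++
          PySem.Int.toChars (if x > 8 then start + x + r * 16 - 1 else start + x + r * 16)))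
      (PySem.List.pyRange 0 17 1)
    = PySem.List.slice ((PySem.List.pyRange 0 (16 * total) 1).map
          (fun i => String.ofList (base ++ PySem.Int.toChars (start + i))))
        (some (16 * r)) (some (16 * r + 8)) ++ ["M"] ++
      PySem.List.slice ((PySem.List.pyRange 0 (16 * total) 1).map
          (fun i => String.ofList (base ++ PySem.Int.toChars (start + i))))
        (some (16 * r + 8)) (some (16 * r + 16)) := by
  rw [slice_map_pyRange _ _ _ _ (by omega) (by omega) (by omega),
      slice_map_pyRange _ _ _ _ (by omega) (by omega) (by omega),
      PySem.List.pyRange_one, PySem.List.pyRange_one, PySem.List.pyRange_one]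
  rw [show (16 * r + 8 - 16 * r : Int).toNat = 8 by omega,
      show (16 * r + 16 - (16 * r + 8) : Int).toNat = 8 by omega,
      show ((17 : Int) - 0).toNat = 17 by decide]
  simp only [List.range_succ, List.range_zero, List.map_cons, List.map_nil,
    List.nil_append, List.cons_append]
  norm_num
  ring_nf
  simp

-- ===== VERDICT (by name: the statement is the Claim_ definition above) =====
theorem generate_sample_names_spec : Claim_equal_generate_sample_names := by
  intro first_name total_rows _ _
  unfold Spec_generate_sample_names generate_sample_names generate_sample_names_alt
  cases h : PySem.Int.ofChars? (first_name.toList.filter PySem.Chars.isdigit) with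
  | none => rfl
  | some start =>
    simp only [PySem.List.foldl_append_singleton_eq_map, List.nil_append]
    apply List.map_congr_left
    intro r hr
    rw [PySem.List.mem_pyRange_one] at hr
    exact row_eq (first_name.toList.filter PySem.Chars.isalpha) start total_rows r hr.1 hr.2
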